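-- pv_equiv track=rewrite | github.com/guillermopickman-spec/story_booker | services/pdf_generator.py | _get_paragraph_colors
-- ===== SOURCE A (Python) =====
-- from typing import List, Dict, Tuple, Optional
--
-- def _get_paragraph_colors(num_paragraphs: int) -> List[Tuple[int, int, int]]:
--     """
--     Generate color list for paragraphs.
--     Uses a palette of bright, readable colors.
--
--     Args:
--         num_paragraphs: Number of paragraphs
--
--     Returns:
--         List of RGB color tuples, one for each paragraph
--     """
--     # Palette of bright, readable colors (with black stroke, these will be visible)
--     color_palette = [
--         (255, 255, 255),  # White
--         (255, 255, 200),  # Light yellow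
--         (200, 255, 255),  # Light cyan
--         (255, 200, 255),  # Light magenta
--         (200, 255, 200),  # Light green
--         (255, 240, 200),  # Light orange
--         (240, 240, 255),  # Light blue
--         (255, 220, 220),  # Light pink
--     ]
--
--     colors = []
--     for i in range(num_paragraphs):
--         colors.append(color_palette[i % len(color_palette)])
--
--     return colors
-- ===== SOURCE B (Python) =====
-- from typing import List, Tuple
--
-- def _get_paragraph_colors(num_paragraphs: int) -> List[Tuple[int, int, int]]:
--     """Cycling palette colors, built by list replication and one slice."""
--     color_palette = [
--         (255, 255, 255),
--         (255, 255, 200),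
--         (200, 255, 255),
--         (255, 200, 255),
--         (200, 255, 200),
--         (255, 240, 200),
--         (240, 240, 255),
--         (255, 220, 220),
--     ]
--     reps = num_paragraphs // len(color_palette) + 1
--     return (color_palette * reps)[:num_paragraphs]
-- ===== Notes on version B (the rewrite author's own statement) =====
-- stated objective: simpler
-- what changed: Replaces the element-by-element loop with modular indexing by whole-list replication (palette * reps) followed by a single slice [:num_paragraphs].
import Mathlib
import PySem

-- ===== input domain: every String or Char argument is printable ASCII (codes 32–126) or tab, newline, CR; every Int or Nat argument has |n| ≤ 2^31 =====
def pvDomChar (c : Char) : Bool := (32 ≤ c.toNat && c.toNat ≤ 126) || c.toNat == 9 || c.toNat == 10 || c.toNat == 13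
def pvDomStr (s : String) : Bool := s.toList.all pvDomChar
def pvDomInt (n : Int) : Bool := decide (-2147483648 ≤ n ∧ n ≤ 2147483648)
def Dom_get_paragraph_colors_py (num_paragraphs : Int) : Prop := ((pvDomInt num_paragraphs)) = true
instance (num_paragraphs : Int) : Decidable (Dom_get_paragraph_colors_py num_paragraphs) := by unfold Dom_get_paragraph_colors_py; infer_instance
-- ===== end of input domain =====

-- B builds the color list by whole-palette replication plus one slice instead of A's
-- element-by-element loop with modular indexing (objective: simpler).

-- the palette literal both Pythons define locally
def pvPalette : List (Int × Int × Int) :=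
  [(255, 255, 255), (255, 255, 200), (200, 255, 255), (255, 200, 255),
   (200, 255, 200), (255, 240, 200), (240, 240, 255), (255, 220, 220)]

-- ===== PORT A =====
-- for i in range(n): colors.append(palette[i % len(palette)])  — index i % 8 is always
-- in range, so the pyGetD default (0,0,0) is never used
def get_paragraph_colors_py (num_paragraphs : Int) : List (Int × Int × Int) :=
  (PySem.List.pyRange 0 num_paragraphs 1).foldl
    (fun colors i =>
      colors ++ [PySem.List.pyGetD pvPalette (PySem.Int.mod i (pvPalette.length : Int)) (0, 0, 0)])
    []

-- ===== PORT B =====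
-- reps = n // len(palette) + 1; return (palette * reps)[:n]
def get_paragraph_colors_py_alt (num_paragraphs : Int) : List (Int × Int × Int) :=
  PySem.List.slice
    ((List.replicate (PySem.Int.floordiv num_paragraphs (pvPalette.length : Int) + 1).toNat
        pvPalette).flatten)
    none (some num_paragraphs)

-- ===== PRECONDITION & SPEC =====
def Spec_get_paragraph_colors_py (num_paragraphs : Int) (out : List (Int × Int × Int)) : Prop := out = get_paragraph_colors_py_alt num_paragraphs
instance (num_paragraphs : Int) (out : List (Int × Int × Int)) : Decidable (Spec_get_paragraph_colors_py num_paragraphs out) := by unfold Spec_get_paragraph_colors_py; infer_instance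

-- ===== CLAIM (what is proved, stated in full; the proofs are below) =====
def Claim_equal_get_paragraph_colors_py : Prop := ∀ (num_paragraphs : Int), Dom_get_paragraph_colors_py num_paragraphs → Spec_get_paragraph_colors_py num_paragraphs (get_paragraph_colors_py num_paragraphs)

-- ===== LEMMAS AND PROOFS =====

-- common normal form of both ports
def pvCycle (m : Nat) : List (Int × Int × Int) :=
  (List.range m).map (fun k => pvPalette.getD (k % 8) (0, 0, 0))

lemma pvA_eq (n : Int) : get_paragraph_colors_py n = pvCycle n.toNat := by
  unfold get_paragraph_colors_py pvCycle
  rw [PySem.List.foldl_append_singleton_eq_map, PySem.List.pyRange_one, List.map_map]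
  simp only [List.nil_append, Function.comp_def, zero_add, sub_zero]
  refine List.map_congr_left (fun k _ => ?_)
  have h8 : (pvPalette.length : Int) = (8 : Int) := by norm_num [pvPalette]
  rw [h8, PySem.Int.mod_eq_emod_of_pos (by norm_num)]
  have : ((k : Int) % 8) = ((k % 8 : Nat) : Int) := by omega
  rw [this, PySem.List.pyGetD_natCast]

lemma pvFlatten_getElem? (r i : Nat) :
    ((List.replicate r pvPalette).flatten)[i]? =
      if i < 8 * r then some (pvPalette.getD (i % 8) (0, 0, 0)) else none := by
  induction r generalizing i with
  | zero => simp
  | succ r ih =>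
    simp only [List.replicate_succ, List.flatten_cons, List.getElem?_append]
    have hplen : pvPalette.length = 8 := by decide
    by_cases h : i < 8
    · rw [if_pos (by omega : i < pvPalette.length),
        if_pos (by omega : i < 8 * (r + 1))]
      interval_cases i <;> decide
    · rw [if_neg (by omega : ¬ i < pvPalette.length), hplen, ih (i - 8)]
      have hmod : (i - 8) % 8 = i % 8 := by omega
      have hiff : i - 8 < 8 * r ↔ i < 8 * (r + 1) := by omega
      rw [hmod]
      by_cases h2 : i < 8 * (r + 1)
      · rw [if_pos (hiff.mpr h2), if_pos h2]
      · rw [if_neg (fun hh => h2 (hiff.mp hh)), if_neg h2]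

lemma pvTake_flatten (r m : Nat) (hm : m ≤ 8 * r) :
    List.take m ((List.replicate r pvPalette).flatten) = pvCycle m := by
  apply List.ext_getElem?
  intro i
  rw [List.getElem?_take, pvCycle, List.getElem?_map, pvFlatten_getElem? r i]
  by_cases h : i < m
  · rw [if_pos h, if_pos (by omega : i < 8 * r), List.getElem?_range h, Option.map_some]
  · rw [if_neg h, List.getElem?_eq_none_iff.mpr (by simpa using h), Option.map_none]

-- ===== VERDICT (by name: the statement is the Claim_ definition above) =====
theorem get_paragraph_colors_py_spec : Claim_equal_get_paragraph_colors_py := by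
  intro n _
  unfold Spec_get_paragraph_colors_py get_paragraph_colors_py_alt
  rw [pvA_eq]
  have h8 : (pvPalette.length : Int) = (8 : Int) := by norm_num [pvPalette]
  rw [h8, PySem.Int.floordiv_eq_ediv_of_pos (by norm_num)]
  by_cases h : 0 ≤ n
  · rw [PySem.List.slice_to _ h]
    exact (pvTake_flatten _ _ (by omega)).symm
  · have h1 : (n / 8 + 1).toNat = 0 := by omega
    have h2 : n.toNat = 0 := by omega
    rw [h1, h2]
    simp [PySem.List.slice, pvCycle]
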